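-- pv_equiv track=rewrite | github.com/DevMatheusMonteiro/VQEDA_TP3 | ex05.py | teams
-- ===== SOURCE A (Python) =====
-- def teams(candidates, k, start=0, current="", result=None):
--     if result is None:
--         result = []
--     if len(current) == k:
--         result.append(current)
--         return
--     for i in range(start, len(candidates)):
--         teams(candidates, k, i + 1, current + candidates[i], result)
--     return result
-- ===== SOURCE B (Python) =====
-- def teams(candidates, k, start=0, current="", result=None):
--     if result is None:
--         result = []
--     stack = [(start, current)]
--     while stack:
--         s, cur = stack.pop()
--         if len(cur) == k:
--             result.append(cur)
--             continue
--         for i in reversed(range(s, len(candidates))):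
--             stack.append((i + 1, cur + candidates[i]))
--     return result
-- ===== Notes on version B (the rewrite author's own statement) =====
-- stated objective: alternative
-- what changed: Replaces the recursion with an explicit DFS stack of (start, current) frames, pushing children in descending index order so the lexicographic output order matches; the len==k check moves into the loop, so B returns the result list even when the initial current already has length k, where A returns None.
-- outside the precondition, e.g. on teams(['a', 'b'], 0, 0, '', None): A returns None, B returns ['']
import Mathlib
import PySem

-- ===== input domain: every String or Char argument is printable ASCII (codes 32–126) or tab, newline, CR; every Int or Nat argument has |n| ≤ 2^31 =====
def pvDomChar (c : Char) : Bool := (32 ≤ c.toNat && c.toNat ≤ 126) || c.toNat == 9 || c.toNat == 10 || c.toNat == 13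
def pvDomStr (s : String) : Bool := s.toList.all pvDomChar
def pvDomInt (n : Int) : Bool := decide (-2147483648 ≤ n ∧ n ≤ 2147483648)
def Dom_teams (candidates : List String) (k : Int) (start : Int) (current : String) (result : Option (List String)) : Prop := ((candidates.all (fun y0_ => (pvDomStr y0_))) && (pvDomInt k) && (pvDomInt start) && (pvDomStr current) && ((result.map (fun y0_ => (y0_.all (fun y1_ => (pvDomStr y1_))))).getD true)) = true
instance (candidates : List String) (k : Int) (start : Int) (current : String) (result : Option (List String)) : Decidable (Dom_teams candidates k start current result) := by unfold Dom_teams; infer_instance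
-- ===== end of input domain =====

-- B replaces A's recursion with an explicit DFS stack of (start, current) frames (children
-- pushed in descending index order so output order matches); equivalence of RETURN values
-- (both Pythons append into the caller-supplied result list).


-- ===== PORT A =====
-- recursive helper = A's body once `result` is a concrete list (threaded as accumulator;
-- Python mutates it in place); the recursive calls' return values are ignored in A, the
-- appended entries are what the caller sees.
def teamsAux (candidates : List String) (k : Int) (start : Int) (current : String) (acc : List String) : List String :=
  if (current.length : Int) = k then acc ++ [current]
  else (PySem.List.pyRange start (candidates.length : Int) 1).attach.foldl
    (fun a i => teamsAux candidates k (i.1 + 1)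
      (current ++ (PySem.List.pyGet? candidates i.1).getD "") a) acc
termination_by ((candidates.length : Int) - start).toNat
decreasing_by
  have h := (PySem.List.mem_pyRange_one.mp i.2)
  omega

def teams (candidates : List String) (k : Int) (start : Int) (current : String) (result : Option (List String)) : List String :=
  teamsAux candidates k start current (result.getD [])

-- ===== PORT B =====
-- weight of a stack frame / whole stack: termination measure for the DFS loop
def pvFrameW (len : Int) (p : Int × String) : Nat := 2 ^ ((len - p.1).toNat)
def pvStackW (len : Int) (stack : List (Int × String)) : Nat := (stack.map (pvFrameW len)).sum

-- geometric bound used by the loop's termination proof (cited in decreasing_by)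
theorem pvChildrenW (len s : Int) :
    ((PySem.List.pyRange s len 1).map (fun i => 2 ^ ((len - (i + 1)).toNat))).sum
      = 2 ^ ((len - s).toNat) - 1 := by
  by_cases h : len ≤ s
  · rw [PySem.List.pyRange_one_eq_nil h]
    have : (len - s).toNat = 0 := by omega
    simp [this]
  · rw [PySem.List.pyRange_one_cons (lt_of_not_ge h)]
    have ih := pvChildrenW len (s + 1)
    simp only [List.map_cons, List.sum_cons, ih]
    have h1 : (len - (s + 1)).toNat + 1 = (len - s).toNat := by omega
    have h2 : 0 < 2 ^ ((len - (s + 1)).toNat) := Nat.pow_pos (by norm_num)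
    have h3 : 2 ^ ((len - (s + 1)).toNat) * 2 = 2 ^ ((len - s).toNat) := by
      rw [← pow_succ, h1]
    omega
termination_by (len - s).toNat
decreasing_by omega

-- pushing the reversed index range onto the stack = mapping the frames in order
-- (cited by the loop's decreasing_by and by the proofs below)
theorem pvPush_eq_map (candidates : List String) (cur : String) (l : List Int) (st : List (Int × String)) :
    l.reverse.foldl (fun st i => (i + 1, cur ++ (PySem.List.pyGet? candidates i).getD "") :: st) st
      = l.map (fun i => (i + 1, cur ++ (PySem.List.pyGet? candidates i).getD "")) ++ st := by
  rw [List.foldl_reverse]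
  induction l with
  | nil => rfl
  | cons x xs ih => simp [ih]

-- the DFS loop: pop a frame; emit on len == k, otherwise push the children
-- (reversed(range(s, len)) so the smallest index pops first, matching A's order)
def teamsAltLoop (candidates : List String) (k : Int) (stack : List (Int × String)) (result : List String) : List String :=
  match stack with
  | [] => result
  | (s, cur) :: rest =>
    if (cur.length : Int) = k then teamsAltLoop candidates k rest (result ++ [cur])
    else teamsAltLoop candidates k
      ((PySem.List.pyRange s (candidates.length : Int) 1).reverse.foldl
        (fun st i => (i + 1, cur ++ (PySem.List.pyGet? candidates i).getD "") :: st) rest)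
      result
termination_by pvStackW (candidates.length : Int) stack
decreasing_by
  · simp only [pvStackW, List.map_cons, List.sum_cons, pvFrameW]
    have : 0 < 2 ^ (((candidates.length : Int) - s).toNat) := Nat.pow_pos (by norm_num)
    omega
  · rw [pvPush_eq_map]
    simp only [pvStackW, List.map_append, List.sum_append, List.map_map, List.map_cons, List.sum_cons]
    have h1 : ((PySem.List.pyRange s (candidates.length : Int) 1).map
        ((pvFrameW (candidates.length : Int)) ∘ (fun i => (i + 1, cur ++ (PySem.List.pyGet? candidates i).getD "")))).sum
        = 2 ^ (((candidates.length : Int) - s).toNat) - 1 := by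
      rw [← pvChildrenW (candidates.length : Int) s]; rfl
    rw [h1]
    have : (1:Nat) ≤ 2 ^ (((candidates.length : Int) - s).toNat) := Nat.one_le_two_pow
    simp only [pvFrameW]
    omega

def teams_alt (candidates : List String) (k : Int) (start : Int) (current : String) (result : Option (List String)) : List String :=
  teamsAltLoop candidates k [(start, current)] (result.getD [])

-- ===== PRECONDITION & SPEC =====
-- Pre_ excludes (a) inputs with len(current) == k, where A appends and then does a bare
-- `return`, returning None instead of a list, and (b) start < -len(candidates), where
-- A raises IndexError on candidates[start]; B returns the natural result list on (a).
def Pre_teams (candidates : List String) (k : Int) (start : Int) (current : String) (result : Option (List String)) : Prop :=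
  (current.length : Int) ≠ k ∧ -(candidates.length : Int) ≤ start
instance (candidates : List String) (k : Int) (start : Int) (current : String) (result : Option (List String)) : Decidable (Pre_teams candidates k start current result) := by unfold Pre_teams; infer_instance
def pvWitness_teams : List String × Int × Int × String × Option (List String) := (["a", "b", "c"], 2, 0, "", none)

def Spec_teams (candidates : List String) (k : Int) (start : Int) (current : String) (result : Option (List String)) (out : List String) : Prop := out = teams_alt candidates k start current result
instance (candidates : List String) (k : Int) (start : Int) (current : String) (result : Option (List String)) (out : List String) : Decidable (Spec_teams candidates k start current result out) := by unfold Spec_teams; infer_instance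

-- ===== CLAIM (what is proved, stated in full; the proofs are below) =====
def Claim_equal_teams : Prop := ∀ (candidates : List String) (k : Int) (start : Int) (current : String) (result : Option (List String)), Dom_teams candidates k start current result → Pre_teams candidates k start current result → Spec_teams candidates k start current result (teams candidates k start current result)

-- ===== LEMMAS AND PROOFS =====

-- loop invariant: the DFS loop folds teamsAux over the stack frames
theorem pvLoop_eq_foldl (candidates : List String) (k : Int) (stack : List (Int × String)) (res : List String) :
    teamsAltLoop candidates k stack res
      = stack.foldl (fun r p => teamsAux candidates k p.1 p.2 r) res := by
  match stack with
  | [] => simp [teamsAltLoop]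
  | (s, cur) :: rest =>
    rw [teamsAltLoop]
    by_cases h : (cur.length : Int) = k
    · rw [if_pos h, pvLoop_eq_foldl]
      simp only [List.foldl_cons]
      rw [teamsAux, if_pos h]
    · rw [if_neg h, pvLoop_eq_foldl, pvPush_eq_map, List.foldl_append]
      simp only [List.foldl_cons]
      rw [teamsAux, if_neg h]
      congr 1
      rw [List.foldl_map]
      exact (List.foldl_attach
        (f := fun a i => teamsAux candidates k (i + 1)
          (cur ++ (PySem.List.pyGet? candidates i).getD "") a) (b := res)).symm
termination_by pvStackW (candidates.length : Int) stack
decreasing_by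
  · simp only [pvStackW, List.map_cons, List.sum_cons, pvFrameW]
    have : 0 < 2 ^ (((candidates.length : Int) - s).toNat) := Nat.pow_pos (by norm_num)
    omega
  · rw [pvPush_eq_map]
    simp only [pvStackW, List.map_append, List.sum_append, List.map_map, List.map_cons, List.sum_cons]
    have h1 : ((PySem.List.pyRange s (candidates.length : Int) 1).map
        ((pvFrameW (candidates.length : Int)) ∘ (fun i => (i + 1, cur ++ (PySem.List.pyGet? candidates i).getD "")))).sum
        = 2 ^ (((candidates.length : Int) - s).toNat) - 1 := by
      rw [← pvChildrenW (candidates.length : Int) s]; rfl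
    rw [h1]
    have : (1:Nat) ≤ 2 ^ (((candidates.length : Int) - s).toNat) := Nat.one_le_two_pow
    simp only [pvFrameW]
    omega

-- ===== VERDICT (by name: the statement is the Claim_ definition above) =====
theorem teams_spec : Claim_equal_teams := by
  intro candidates k start current result _ _
  unfold Spec_teams teams teams_alt
  rw [pvLoop_eq_foldl]
  simp
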